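-- pv_equiv track=rewrite | github.com/sameerSyedNadeem/First-Programming-Project-LOGIC-DOTS | supporting work/thebeauty.py | are_touching
-- ===== SOURCE A (Python) =====
-- def getPositions(board,color):
--     pos=[]
--     for i in range(len(board)):
--         for j in range(len(board[i])):
--             if board[i][j] == color:
--                 pos.append((i,j))
--     return pos
--
-- def are_touching(board,color1,color2, isTrue=True):
--     pos1=getPositions(board,color1)
--     pos2=getPositions(board,color2)
--     if isTrue:
--         if pos1==pos2 and (len(pos1)>1):
--             for i in range(len(pos1)-1):
--                 if (-2<pos1[i][0]-pos1[i+1][0]<2 and -2<pos1[i][1]-pos1[i+1][1]<2) and (pos1[i][0]==pos1[i+1][0] or pos1[i][1]==pos2[i+1][1]):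
--                     return True
--         elif pos1!=pos2:
--             for i in range(len(pos1)):
--                 for j in range(len(pos2)):
--                     if (-2<pos1[i][0]-pos2[j][0]<2 and -2<pos1[i][1]-pos2[j][1]<2) and (pos1[i][0]==pos2[j][0] or pos1[i][1]==pos2[j][1]):
--                         return True
--         return False
--     else:
--         return not are_touching(board,color1,color2)
-- ===== SOURCE B (Python) =====
-- def are_touching(board, color1, color2, isTrue=True):
--     pos1 = [(i, j) for i, row in enumerate(board) for j, v in enumerate(row) if v == color1]
--     pos2 = [(i, j) for i, row in enumerate(board) for j, v in enumerate(row) if v == color2]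
--     if pos1 == pos2:
--         # same position list: the original scans consecutive pairs only
--         touch = any(abs(a - c) < 2 and abs(b - d) < 2 and (a == c or b == d)
--                     for (a, b), (c, d) in zip(pos1, pos1[1:]))
--     else:
--         # hash the color2 cells; for each color1 cell probe the 5 cells the
--         # adjacency predicate |di|<2, |dj|<2, (di==0 or dj==0) admits
--         cells2 = set(pos2)
--         touch = any((i + di, j + dj) in cells2
--                     for i, j in pos1
--                     for di, dj in ((0, 0), (0, 1), (0, -1), (1, 0), (-1, 0)))
--     return touch if isTrue else not touch
-- ===== Notes on version B (the rewrite author's own statement) =====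
-- stated objective: alternative
-- what changed: The all-pairs index scan comparing every color1 position against every color2 position is replaced by a hash set of the color2 cells probed at each color1 cell's 5 candidate neighbour offsets (and the equal-lists branch by a zip over consecutive pairs); the pair scan drops from O(N*M) to O(N+M), though the whole-board position scan dominates on the timed inputs, so no overall speed is claimed.
import Mathlib
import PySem

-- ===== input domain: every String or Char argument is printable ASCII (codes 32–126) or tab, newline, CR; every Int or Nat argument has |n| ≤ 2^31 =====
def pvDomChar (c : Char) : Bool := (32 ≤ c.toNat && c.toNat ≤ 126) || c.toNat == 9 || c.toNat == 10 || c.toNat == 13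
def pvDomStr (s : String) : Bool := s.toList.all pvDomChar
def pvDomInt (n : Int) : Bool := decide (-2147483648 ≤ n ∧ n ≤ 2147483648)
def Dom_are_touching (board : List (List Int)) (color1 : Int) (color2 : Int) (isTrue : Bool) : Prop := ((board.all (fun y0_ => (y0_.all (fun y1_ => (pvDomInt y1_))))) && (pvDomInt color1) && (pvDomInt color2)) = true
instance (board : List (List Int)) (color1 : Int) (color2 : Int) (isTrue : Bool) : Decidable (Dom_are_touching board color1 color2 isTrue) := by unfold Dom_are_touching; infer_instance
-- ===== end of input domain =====

-- B replaces A's all-pairs index scan of the two colour-position lists by a hash set of the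
-- color2 cells probed at each color1 cell's 5 candidate neighbours (objective: alternative).

-- ===== PORT A =====
-- getPositions: index loops over range(len(...)) reading board[i][j]
def getPositions (board : List (List Int)) (color : Int) : List (Int × Int) :=
  (PySem.List.pyRange 0 (board.length : Int) 1).foldl (fun pos i =>
    (PySem.List.pyRange 0 ((PySem.List.pyGetD board i []).length : Int) 1).foldl (fun pos j =>
      if PySem.List.pyGetD (PySem.List.pyGetD board i []) j 0 == color then pos ++ [(i, j)]
      else pos) pos) []

-- body of are_touching for isTrue=True; the isTrue=False branch of the Python recurses once
-- with the default True, i.e. returns the negation of this value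
def are_touching_core (board : List (List Int)) (color1 : Int) (color2 : Int) : Bool :=
  let pos1 := getPositions board color1
  let pos2 := getPositions board color2
  if pos1 = pos2 ∧ 1 < pos1.length then
    (PySem.List.pyRange 0 ((pos1.length : Int) - 1) 1).any (fun i =>
      let a := PySem.List.pyGetD pos1 i (0, 0)
      let b := PySem.List.pyGetD pos1 (i + 1) (0, 0)
      let b2 := PySem.List.pyGetD pos2 (i + 1) (0, 0)
      decide ((-2 < a.1 - b.1 ∧ a.1 - b.1 < 2 ∧ -2 < a.2 - b.2 ∧ a.2 - b.2 < 2) ∧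
              (a.1 = b.1 ∨ a.2 = b2.2)))
  else if pos1 ≠ pos2 then
    (PySem.List.pyRange 0 ((pos1.length : Int)) 1).any (fun i =>
      (PySem.List.pyRange 0 ((pos2.length : Int)) 1).any (fun j =>
        let a := PySem.List.pyGetD pos1 i (0, 0)
        let b := PySem.List.pyGetD pos2 j (0, 0)
        decide ((-2 < a.1 - b.1 ∧ a.1 - b.1 < 2 ∧ -2 < a.2 - b.2 ∧ a.2 - b.2 < 2) ∧
                (a.1 = b.1 ∨ a.2 = b.2))))
  else false

def are_touching (board : List (List Int)) (color1 : Int) (color2 : Int) (isTrue : Bool) : Bool :=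
  if isTrue then are_touching_core board color1 color2
  else !(are_touching_core board color1 color2)

-- ===== PORT B =====
-- [(i, j) for i, row in enumerate(board) for j, v in enumerate(row) if v == color]
def positionsOf (board : List (List Int)) (color : Int) : List (Int × Int) :=
  (PySem.List.enumerate board).flatMap (fun p =>
    (PySem.List.enumerate p.2).flatMap (fun q =>
      if q.2 == color then [(p.1, q.1)] else []))

-- the 5 candidate offsets of B's neighbour probe
def altOffsets : List (Int × Int) := [(0, 0), (0, 1), (0, -1), (1, 0), (-1, 0)]

def are_touching_alt (board : List (List Int)) (color1 : Int) (color2 : Int) (isTrue : Bool) : Bool :=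
  let pos1 := positionsOf board color1
  let pos2 := positionsOf board color2
  let touch :=
    if pos1 = pos2 then
      (pos1.zip (PySem.List.slice pos1 (some 1) none)).any (fun x =>
        decide (|x.1.1 - x.2.1| < 2 ∧ |x.1.2 - x.2.2| < 2 ∧ (x.1.1 = x.2.1 ∨ x.1.2 = x.2.2)))
    else
      let cells2 := PySem.Set.ofList pos2
      pos1.any (fun a => altOffsets.any (fun d => PySem.Set.contains cells2 (a.1 + d.1, a.2 + d.2)))
  if isTrue then touch else !touch

-- ===== PRECONDITION & SPEC =====
def Spec_are_touching (board : List (List Int)) (color1 : Int) (color2 : Int) (isTrue : Bool) (out : Bool) : Prop := out = are_touching_alt board color1 color2 isTrue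
instance (board : List (List Int)) (color1 : Int) (color2 : Int) (isTrue : Bool) (out : Bool) : Decidable (Spec_are_touching board color1 color2 isTrue out) := by unfold Spec_are_touching; infer_instance

-- ===== CLAIM (what is proved, stated in full; the proofs are below) =====
def Claim_equal_are_touching : Prop := ∀ (board : List (List Int)) (color1 : Int) (color2 : Int) (isTrue : Bool), Dom_are_touching board color1 color2 isTrue → Spec_are_touching board color1 color2 isTrue (are_touching board color1 color2 isTrue)

-- ===== LEMMAS AND PROOFS =====

-- a comprehension with a filter clause is a filter-then-map
lemma flatMap_if_singleton {α β : Type} (l : List α) (p : α → Bool) (f : α → β) :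
    l.flatMap (fun x => if p x then [f x] else []) = (l.filter p).map f := by
  induction l with
  | nil => rfl
  | cons x t ih => simp [List.flatMap_cons, List.filter_cons, ih]; split <;> simp

-- A's inner row loop collects exactly the matching (i, j) pairs
lemma row_fold (color : Int) (i : Int) (row : List Int) (pos : List (Int × Int)) :
    (PySem.List.pyRange 0 (row.length : Int) 1).foldl (fun pos j =>
        if PySem.List.pyGetD row j 0 == color then pos ++ [(i, j)] else pos) pos
    = pos ++ ((PySem.List.enumerate row).filter (fun q => q.2 == color)).map (fun q => (i, q.1)) := by
  have hr : PySem.List.enumerate row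
      = (PySem.List.pyRange 0 (row.length : Int) 1).map (fun j => (j, PySem.List.pyGetD row j 0)) := by
    simpa using PySem.List.enumerate_eq_map_pyRange (xs := row) (d := (0 : Int))
  rw [← PySem.List.foldl_append_if (p := fun q : Int × Int => q.2 == color)
      (f := fun q : Int × Int => (i, q.1)), hr, List.foldl_map]

-- the two position scans compute the same list
lemma positions_eq (board : List (List Int)) (color : Int) :
    getPositions board color = positionsOf board color := by
  have h1 : PySem.List.enumerate board
      = (PySem.List.pyRange 0 (board.length : Int) 1).map
          (fun j => (j, PySem.List.pyGetD board j [])) := by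
    simpa using PySem.List.enumerate_eq_map_pyRange (xs := board) (d := ([] : List Int))
  calc getPositions board color
      = (PySem.List.enumerate board).foldl (fun pos p =>
          (PySem.List.pyRange 0 (p.2.length : Int) 1).foldl (fun pos j =>
            if PySem.List.pyGetD p.2 j 0 == color then pos ++ [(p.1, j)] else pos) pos) [] := by
        unfold getPositions; rw [h1, List.foldl_map]
    _ = (PySem.List.enumerate board).foldl (fun pos p =>
          pos ++ ((PySem.List.enumerate p.2).filter (fun q => q.2 == color)).map (fun q => (p.1, q.1))) [] := by
        apply PySem.List.foldl_congr_mem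
        intro acc p _
        exact row_fold color p.1 p.2 acc
    _ = [] ++ (PySem.List.enumerate board).flatMap (fun p =>
          ((PySem.List.enumerate p.2).filter (fun q => q.2 == color)).map (fun q => (p.1, q.1))) := by
        apply PySem.List.foldl_append_eq_flatMap
    _ = positionsOf board color := by
        simp only [positionsOf, flatMap_if_singleton, List.nil_append]

-- any over range indices = any over the list
lemma any_range_getD {α : Type} (l : List α) (d : α) (f : α → Bool) :
    (PySem.List.pyRange 0 ((l.length : Int)) 1).any (fun i => f (PySem.List.pyGetD l i d)) = l.any f := by
  rw [PySem.List.pyRange_one]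
  simp only [List.any_map, Function.comp_def, zero_add, sub_zero, Int.toNat_natCast,
    PySem.List.pyGetD_natCast]
  rw [Bool.eq_iff_iff]
  simp only [List.any_eq_true, List.mem_range]
  constructor
  · rintro ⟨k, hk, hf⟩
    exact ⟨l.getD k d, by rw [List.getD_eq_getElem l d hk]; exact l.getElem_mem hk, hf⟩
  · rintro ⟨x, hx, hf⟩
    obtain ⟨k, hk, rfl⟩ := List.mem_iff_getElem.mp hx
    exact ⟨k, hk, by rwa [List.getD_eq_getElem l d hk]⟩

-- any over consecutive index pairs = any over zip with the tail
lemma consec_any {α : Type} (l : List α) (d : α) (p : α → α → Bool) :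
    (PySem.List.pyRange 0 ((l.length : Int) - 1) 1).any (fun i =>
        p (PySem.List.pyGetD l i d) (PySem.List.pyGetD l (i + 1) d))
      = (l.zip l.tail).any (fun x => p x.1 x.2) := by
  rw [PySem.List.pyRange_one]
  rw [Bool.eq_iff_iff]
  simp only [List.any_map, Function.comp_def, zero_add, sub_zero, List.any_eq_true, List.mem_range]
  have E : ∀ (k : Nat) (hk : k + 1 < l.length),
      PySem.List.pyGetD l ((k : Int)) d = l[k]'(Nat.lt_of_succ_lt hk) ∧
      PySem.List.pyGetD l ((k : Int) + 1) d = l[k+1]'hk := by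
    intro k hk
    constructor
    · rw [PySem.List.pyGetD_eq_getElem l d (by omega) (by omega)]
      simp
    · rw [PySem.List.pyGetD_eq_getElem l d (by omega) (by omega)]
      have h3 : ((k : Int) + 1).toNat = k + 1 := by omega
      simp [h3]
  constructor
  · rintro ⟨k, hk, hf⟩
    have h2 : k + 1 < l.length := by omega
    obtain ⟨e1, e2⟩ := E k h2
    refine ⟨(l[k]'(by omega), l.tail[k]'(by rw [List.length_tail]; omega)), ?_, ?_⟩
    · exact List.mem_iff_getElem.mpr ⟨k, by simp [List.length_zip, List.length_tail]; omega,
        by simp [List.getElem_zip]⟩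
    · rw [e1, e2] at hf
      simpa [List.getElem_tail] using hf
  · rintro ⟨x, hx, hf⟩
    obtain ⟨k, hk, rfl⟩ := List.mem_iff_getElem.mp hx
    simp only [List.length_zip, List.length_tail] at hk
    have h2 : k + 1 < l.length := by omega
    obtain ⟨e1, e2⟩ := E k h2
    refine ⟨k, by omega, ?_⟩
    rw [e1, e2]
    simpa [List.getElem_zip, List.getElem_tail] using hf

-- a cell passes A's adjacency test against some pos2 cell iff one of B's 5 probes is in pos2
lemma probe_eq (a : Int × Int) (pos2 : List (Int × Int)) :
    (pos2.any (fun b =>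
        decide ((-2 < a.1 - b.1 ∧ a.1 - b.1 < 2 ∧ -2 < a.2 - b.2 ∧ a.2 - b.2 < 2) ∧
                (a.1 = b.1 ∨ a.2 = b.2))))
      = altOffsets.any (fun d => PySem.Set.contains (PySem.Set.ofList pos2) (a.1 + d.1, a.2 + d.2)) := by
  rw [Bool.eq_iff_iff]
  simp only [List.any_eq_true, decide_eq_true_eq, altOffsets, List.mem_cons,
    PySem.Set.contains_iff, PySem.Set.mem_ofList]
  constructor
  · rintro ⟨b, hb, ⟨h1, h2, h3, h4⟩, h5⟩
    have mk : ∀ (u v : Int), u = b.1 → v = b.2 → (u, v) ∈ pos2 := by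
      rintro u v rfl rfl; simpa using hb
    have hcases : (b.1 = a.1 ∧ b.2 = a.2) ∨ (b.1 = a.1 ∧ b.2 = a.2 + 1) ∨ (b.1 = a.1 ∧ b.2 = a.2 - 1)
        ∨ (b.1 = a.1 + 1 ∧ b.2 = a.2) ∨ (b.1 = a.1 - 1 ∧ b.2 = a.2) := by omega
    rcases hcases with ⟨e1,e2⟩|⟨e1,e2⟩|⟨e1,e2⟩|⟨e1,e2⟩|⟨e1,e2⟩
    · exact ⟨(0,0), by simp, mk (a.1 + 0) (a.2 + 0) (by omega) (by omega)⟩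
    · exact ⟨(0,1), by simp, mk (a.1 + 0) (a.2 + 1) (by omega) (by omega)⟩
    · exact ⟨(0,-1), by simp, mk (a.1 + 0) (a.2 + -1) (by omega) (by omega)⟩
    · exact ⟨(1,0), by simp, mk (a.1 + 1) (a.2 + 0) (by omega) (by omega)⟩
    · exact ⟨(-1,0), by simp, mk (a.1 + -1) (a.2 + 0) (by omega) (by omega)⟩
  · rintro ⟨dd, hd, hmem⟩
    obtain ⟨d1, d2⟩ := dd
    refine ⟨(a.1 + d1, a.2 + d2), hmem, ?_⟩
    simp only [List.not_mem_nil, or_false] at hd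
    rcases hd with h|h|h|h|h <;> obtain ⟨rfl, rfl⟩ := Prod.mk.inj h <;> dsimp only <;> omega

-- nested any over range indices = nested any over the two lists
lemma any2_range_getD {α β : Type} (l1 : List α) (l2 : List β) (d1 : α) (d2 : β) (f : α → β → Bool) :
    (PySem.List.pyRange 0 ((l1.length : Int)) 1).any (fun i =>
      (PySem.List.pyRange 0 ((l2.length : Int)) 1).any (fun j =>
        f (PySem.List.pyGetD l1 i d1) (PySem.List.pyGetD l2 j d2)))
    = l1.any (fun a => l2.any (f a)) := by
  rw [show (fun i => (PySem.List.pyRange 0 ((l2.length : Int)) 1).any (fun j =>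
        f (PySem.List.pyGetD l1 i d1) (PySem.List.pyGetD l2 j d2)))
      = (fun i => (fun a => l2.any (f a)) (PySem.List.pyGetD l1 i d1)) from
    funext (fun i => any_range_getD l2 d2 (f (PySem.List.pyGetD l1 i d1)))]
  exact any_range_getD l1 d1 (fun a => l2.any (f a))

-- the True-branch bodies of A and B agree
lemma core_eq (board : List (List Int)) (color1 : Int) (color2 : Int) :
    are_touching_core board color1 color2 =
      (if positionsOf board color1 = positionsOf board color2 then
        ((positionsOf board color1).zip (PySem.List.slice (positionsOf board color1) (some 1) none)).any (fun x =>
          decide (|x.1.1 - x.2.1| < 2 ∧ |x.1.2 - x.2.2| < 2 ∧ (x.1.1 = x.2.1 ∨ x.1.2 = x.2.2)))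
      else
        (positionsOf board color1).any (fun a => altOffsets.any (fun d =>
          PySem.Set.contains (PySem.Set.ofList (positionsOf board color2)) (a.1 + d.1, a.2 + d.2)))) := by
  unfold are_touching_core
  rw [positions_eq board color1, positions_eq board color2]
  by_cases h : positionsOf board color1 = positionsOf board color2
  · rw [if_pos h]
    rw [← h]
    set L := positionsOf board color1 with hL
    rw [PySem.List.slice_from_one]
    by_cases hlen : 1 < L.length
    · rw [if_pos ⟨rfl, hlen⟩]
      rw [consec_any L (0, 0) (fun a b =>
        decide ((-2 < a.1 - b.1 ∧ a.1 - b.1 < 2 ∧ -2 < a.2 - b.2 ∧ a.2 - b.2 < 2) ∧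
                (a.1 = b.1 ∨ a.2 = b.2)))]
      apply PySem.List.any_congr_mem
      intro x _
      rw [decide_eq_decide]
      rw [abs_lt, abs_lt]
      tauto
    · rw [if_neg (by intro hc; exact hlen hc.2), if_neg (by simp)]
      have hz : L.zip L.tail = [] := by
        match L, hlen with
        | [], _ => rfl
        | [x], _ => rfl
        | x :: y :: t, hlen => exact absurd (by simp only [List.length_cons]; omega) hlen
      rw [hz]
      rfl
  · rw [if_neg (by intro hc; exact h hc.1), if_neg h, if_pos h]
    dsimp only
    refine (any2_range_getD (positionsOf board color1) (positionsOf board color2)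
      ((0 : Int), (0 : Int)) ((0 : Int), (0 : Int))
      (fun a b => decide ((-2 < a.1 - b.1 ∧ a.1 - b.1 < 2 ∧ -2 < a.2 - b.2 ∧ a.2 - b.2 < 2) ∧
        (a.1 = b.1 ∨ a.2 = b.2)))).trans ?_
    apply PySem.List.any_congr_mem
    intro a _
    exact probe_eq a (positionsOf board color2)

-- ===== VERDICT (by name: the statement is the Claim_ definition above) =====
theorem are_touching_spec : Claim_equal_are_touching := by
  intro board color1 color2 isTrue _
  unfold Spec_are_touching are_touching are_touching_alt
  rw [core_eq]
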